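-- pv_equiv track=rewrite | github.com/AronFdo/Pharmask | scripts/download_pubmedqa.py | get_label_distribution
-- ===== SOURCE A (Python) =====
-- def get_label_distribution(dataset) -> dict:
--     """Get distribution of yes/no/maybe labels."""
--     distribution = {"yes": 0, "no": 0, "maybe": 0, "unknown": 0}
--
--     for split_data in dataset.values():
--         for item in split_data:
--             label = item.get("final_decision", "").lower()
--             if label in distribution:
--                 distribution[label] += 1
--             else:
--                 distribution["unknown"] += 1
--
--     return distribution
-- ===== SOURCE B (Python) =====
-- def get_label_distribution(dataset) -> dict:
--     """Get distribution of yes/no/maybe labels."""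
--     labels = [item.get("final_decision", "").lower()
--               for split_data in dataset.values()
--               for item in split_data]
--     yes = labels.count("yes")
--     no = labels.count("no")
--     maybe = labels.count("maybe")
--     return {"yes": yes, "no": no, "maybe": maybe,
--             "unknown": len(labels) - yes - no - maybe}
-- ===== Notes on version B (the rewrite author's own statement) =====
-- stated objective: simpler
-- what changed: Replaces the incremental per-item dict-update loop by a closed-form construction: flatten all labels into one list, take three list.count calls for yes/no/maybe, and compute the unknown bucket arithmetically as len - yes - no - maybe, returning the dict literal directly.
import Mathlib
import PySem

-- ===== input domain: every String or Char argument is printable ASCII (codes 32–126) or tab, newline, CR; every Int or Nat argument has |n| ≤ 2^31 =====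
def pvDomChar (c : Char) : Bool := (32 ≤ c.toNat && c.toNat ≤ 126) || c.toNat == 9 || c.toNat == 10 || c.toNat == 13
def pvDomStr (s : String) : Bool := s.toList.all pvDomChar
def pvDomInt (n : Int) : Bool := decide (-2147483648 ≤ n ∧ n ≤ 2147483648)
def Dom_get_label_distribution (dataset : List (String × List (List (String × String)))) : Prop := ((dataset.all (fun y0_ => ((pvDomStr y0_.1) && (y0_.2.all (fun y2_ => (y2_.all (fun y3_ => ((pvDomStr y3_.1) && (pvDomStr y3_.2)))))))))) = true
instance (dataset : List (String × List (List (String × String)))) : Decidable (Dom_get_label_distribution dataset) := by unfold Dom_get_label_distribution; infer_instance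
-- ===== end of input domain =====

-- B drops the per-item dict-update loop: it flattens all labels into one list, takes three
-- list.count calls, and derives the unknown bucket as len - yes - no - maybe (objective: simpler).

-- ===== PORT A =====
def get_label_distribution (dataset : List (String × List (List (String × String)))) : List (String × Int) :=
  let dist0 : PySem.Dict String Int := PySem.Dict.mk [("yes", 0), ("no", 0), ("maybe", 0), ("unknown", 0)]
  (dataset.foldl (fun dist split_data =>
    split_data.2.foldl (fun dist item =>
      let label := PySem.Str.lower (PySem.Dict.getD (PySem.Dict.mk item) "final_decision" "")
      if dist.contains label then dist.modify label 0 (· + 1)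
      else dist.modify "unknown" 0 (· + 1)) dist) dist0).items

-- ===== PORT B =====
def get_label_distribution_alt (dataset : List (String × List (List (String × String)))) : List (String × Int) :=
  let labels := dataset.flatMap (fun split_data => split_data.2.map (fun item =>
    PySem.Str.lower (PySem.Dict.getD (PySem.Dict.mk item) "final_decision" "")))
  let yes : Int := labels.count "yes"
  let no : Int := labels.count "no"
  let maybe : Int := labels.count "maybe"
  [("yes", yes), ("no", no), ("maybe", maybe), ("unknown", (labels.length : Int) - yes - no - maybe)]

-- ===== PRECONDITION & SPEC =====
def Spec_get_label_distribution (dataset : List (String × List (List (String × String)))) (out : List (String × Int)) : Prop := out = get_label_distribution_alt dataset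
instance (dataset : List (String × List (List (String × String)))) (out : List (String × Int)) : Decidable (Spec_get_label_distribution dataset out) := by unfold Spec_get_label_distribution; infer_instance

-- ===== CLAIM =====
def Claim_equal_get_label_distribution : Prop := ∀ (dataset : List (String × List (List (String × String)))), Dom_get_label_distribution dataset → Spec_get_label_distribution dataset (get_label_distribution dataset)

-- ===== LEMMAS AND PROOFS =====

-- the four-bucket dict with symbolic values
def pvQ4 (a b c d : Int) : PySem.Dict String Int :=
  PySem.Dict.mk [("yes", a), ("no", b), ("maybe", c), ("unknown", d)]

-- labels routed to the "unknown" bucket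
def pvUnk (l : String) : Bool := !(l == "yes" || l == "no" || l == "maybe")

-- A's loop body over an extracted label
def pvStepA (dist : PySem.Dict String Int) (l : String) : PySem.Dict String Int :=
  if dist.contains l then dist.modify l 0 (· + 1) else dist.modify "unknown" 0 (· + 1)

lemma pv_contains_q4 (a b c d : Int) (l : String) :
    (pvQ4 a b c d).contains l = (l == "yes" || l == "no" || l == "maybe" || l == "unknown") := by
  by_cases h1 : l = "yes"
  · subst h1; simp [pvQ4]
  · by_cases h2 : l = "no"
    · subst h2; simp [pvQ4]
    · by_cases h3 : l = "maybe"
      · subst h3; simp [pvQ4]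
      · by_cases h4 : l = "unknown"
        · subst h4; simp [pvQ4]
        · simp [pvQ4, BEq.comm, Bool.or_assoc]

lemma pv_modify_q4 (a b c d : Int) (l : String) (f : Int → Int)
    (hl : l = "yes" ∨ l = "no" ∨ l = "maybe" ∨ l = "unknown") :
    (pvQ4 a b c d).modify l 0 f =
      if l = "yes" then pvQ4 (f a) b c d
      else if l = "no" then pvQ4 a (f b) c d
      else if l = "maybe" then pvQ4 a b (f c) d
      else pvQ4 a b c (f d) := by
  rcases hl with h | h | h | h <;> subst h <;>
    simp [pvQ4, PySem.Dict.modify, PySem.Dict.insert, PySem.Dict.getD, PySem.Dict.get?,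
      PySem.Dict.contains]

lemma pv_stepA_q4 (a b c d : Int) (l : String) :
    pvStepA (pvQ4 a b c d) l =
      pvQ4 (a + if l == "yes" then 1 else 0) (b + if l == "no" then 1 else 0)
           (c + if l == "maybe" then 1 else 0) (d + if pvUnk l then 1 else 0) := by
  unfold pvStepA
  rw [pv_contains_q4]
  by_cases h1 : l = "yes"
  · subst h1
    rw [if_pos (by simp), pv_modify_q4 _ _ _ _ _ _ (Or.inl rfl)]
    simp [pvUnk]
  · by_cases h2 : l = "no"
    · subst h2
      rw [if_pos (by simp), pv_modify_q4 _ _ _ _ _ _ (Or.inr (Or.inl rfl))]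
      simp [pvUnk]
    · by_cases h3 : l = "maybe"
      · subst h3
        rw [if_pos (by simp), pv_modify_q4 _ _ _ _ _ _ (Or.inr (Or.inr (Or.inl rfl)))]
        simp [pvUnk]
      · by_cases h4 : l = "unknown"
        · subst h4
          rw [if_pos (by simp), pv_modify_q4 _ _ _ _ _ _ (Or.inr (Or.inr (Or.inr rfl)))]
          simp [pvUnk]
        · rw [if_neg (by simp [h1, h2, h3, h4]),
            pv_modify_q4 _ _ _ _ _ _ (Or.inr (Or.inr (Or.inr rfl)))]
          simp [pvUnk, h1, h2, h3]

lemma pv_foldA (L : List String) (a b c d : Int) :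
    L.foldl pvStepA (pvQ4 a b c d) =
      pvQ4 (a + L.count "yes") (b + L.count "no") (c + L.count "maybe") (d + L.countP pvUnk) := by
  induction L generalizing a b c d with
  | nil => simp
  | cons l t ih =>
    rw [List.foldl_cons, pv_stepA_q4, ih]
    simp only [pvQ4, PySem.Dict.mk.injEq, List.cons.injEq, Prod.mk.injEq, List.count_cons,
      List.countP_cons, true_and, and_true]
    push_cast
    refine ⟨?_, ?_, ?_, ?_⟩ <;> split_ifs <;> (try simp_all) <;> omega

-- every label falls in exactly one of the four buckets
lemma pv_count_partition (L : List String) :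
    L.count "yes" + L.count "no" + L.count "maybe" + L.countP pvUnk = L.length := by
  induction L with
  | nil => rfl
  | cons l t ih =>
    simp only [List.count_cons, List.countP_cons, List.length_cons]
    by_cases h1 : l = "yes"
    · subst h1; simp [pvUnk]; omega
    · by_cases h2 : l = "no"
      · subst h2; simp [pvUnk]; omega
      · by_cases h3 : l = "maybe"
        · subst h3; simp [pvUnk]; omega
        · simp [pvUnk, h1, h2, h3]; omega

lemma pv_foldl_flatMap {α β γ : Type} (g : β → List α) (f : γ → α → γ) (L : List β) (init : γ) :
    (L.flatMap g).foldl f init = L.foldl (fun acc b => (g b).foldl f acc) init := by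
  induction L generalizing init with
  | nil => rfl
  | cons x t ih => simp [List.flatMap_cons, List.foldl_append, ih]

lemma pv_items_q4 (a b c d : Int) :
    (pvQ4 a b c d).items = [("yes", a), ("no", b), ("maybe", c), ("unknown", d)] := rfl

lemma pv_main_eq (dataset : List (String × List (List (String × String)))) :
    get_label_distribution dataset = get_label_distribution_alt dataset := by
  unfold get_label_distribution get_label_distribution_alt
  dsimp only
  rw [show (PySem.Dict.mk [("yes", (0:Int)), ("no", 0), ("maybe", 0), ("unknown", 0)]) = pvQ4 0 0 0 0 from rfl]
  set L := dataset.flatMap (fun split_data => split_data.2.map (fun item =>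
    PySem.Str.lower (PySem.Dict.getD (PySem.Dict.mk item) "final_decision" ""))) with hL
  have hA : (dataset.foldl (fun dist split_data =>
      split_data.2.foldl (fun dist item =>
        let label := PySem.Str.lower (PySem.Dict.getD (PySem.Dict.mk item) "final_decision" "")
        if dist.contains label then dist.modify label 0 (· + 1)
        else dist.modify "unknown" 0 (· + 1)) dist) (pvQ4 0 0 0 0)) = L.foldl pvStepA (pvQ4 0 0 0 0) := by
    rw [hL, pv_foldl_flatMap]
    exact PySem.List.foldl_congr_mem _ _ _ _ (fun acc b _hb => by rw [List.foldl_map]; rfl)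
  rw [hA, pv_foldA]
  have hpart := pv_count_partition L
  rw [pv_items_q4]
  simp only [zero_add, List.cons.injEq, Prod.mk.injEq, true_and, and_true]
  push_cast
  omega

-- ===== VERDICT =====
theorem get_label_distribution_spec : Claim_equal_get_label_distribution := by
  intro dataset _
  exact pv_main_eq dataset
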